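-- pv_equiv track=rewrite | github.com/AndrijOstrowkyj/programming | Task01/main.py | find_the_item
-- ===== SOURCE A (Python) =====
-- def find_the_item(arr, k):    # Функція для знаходження останнього елементу масиву, що знаходиться в діапазоні (-k; k)
--     y = len(arr) - 1
--     while y >= 0:
--         if -k < arr[y] < k:
--             result = [str(arr[y]), str(arr.index(arr[y]))]
--             return result
--             break
--         else:
--             y -= 1
-- ===== SOURCE B (Python) =====
-- def find_the_item(arr, k):
--     matches = [x for x in arr if -k < x < k]
--     if matches:
--         v = matches[-1]
--         return [str(v), str(arr.index(v))]
-- ===== Notes on version B (the rewrite author's own statement) =====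
-- stated objective: alternative
-- what changed: A's early-stopping reverse index scan is replaced by a forward filter pass; the answer is the last element of the filtered list, with a separate first-index lookup.
import Mathlib
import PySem

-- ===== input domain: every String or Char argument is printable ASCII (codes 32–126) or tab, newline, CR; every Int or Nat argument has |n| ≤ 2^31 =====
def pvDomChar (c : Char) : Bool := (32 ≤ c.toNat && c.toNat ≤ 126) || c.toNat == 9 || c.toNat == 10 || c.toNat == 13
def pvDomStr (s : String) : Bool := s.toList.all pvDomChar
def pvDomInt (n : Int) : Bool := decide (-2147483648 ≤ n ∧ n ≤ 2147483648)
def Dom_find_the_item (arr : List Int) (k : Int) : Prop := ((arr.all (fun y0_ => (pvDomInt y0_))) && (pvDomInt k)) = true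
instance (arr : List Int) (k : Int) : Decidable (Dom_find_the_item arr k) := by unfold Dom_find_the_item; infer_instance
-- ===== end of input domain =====

-- B replaces A's reverse index scan by a forward filter pass plus a first-index lookup (alternative decomposition; equivalence of return values proved).

-- ===== PORT A =====
-- while loop counting y down from len(arr)-1; fuel = y+1, so `y+1` handles index y.
-- arr.getD y 0 is exact for arr[y]: y < arr.length always holds at the call.
-- arr.index(arr[y]): the value is an element of arr, so index? is always some; getD 0 is exact.
def findA_loop (arr : List Int) (k : Int) : Nat → Option (List String)
  | 0 => none
  | y+1 =>
    let v := arr.getD y 0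
    if -k < v ∧ v < k then
      some [PySem.Int.toStr v, PySem.Int.toStr (((PySem.List.index? arr v).getD 0 : Nat) : Int)]
    else findA_loop arr k y

def find_the_item (arr : List Int) (k : Int) : Option (List String) :=
  findA_loop arr k arr.length

-- ===== PORT B =====
-- matches[-1] on a non-empty list is its last element (exact); arr.index(v) as in A.
def find_the_item_alt (arr : List Int) (k : Int) : Option (List String) :=
  let ms := arr.filter (fun x => decide (-k < x) && decide (x < k))
  if h : ms = [] then none
  else
    let v := ms.getLast h
    some [PySem.Int.toStr v, PySem.Int.toStr (((PySem.List.index? arr v).getD 0 : Nat) : Int)]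

-- ===== PRECONDITION & SPEC =====
def Spec_find_the_item (arr : List Int) (k : Int) (out : Option (List String)) : Prop := out = find_the_item_alt arr k
instance (arr : List Int) (k : Int) (out : Option (List String)) : Decidable (Spec_find_the_item arr k out) := by unfold Spec_find_the_item; infer_instance

-- ===== CLAIM (what is proved, stated in full; the proofs are below) =====
def Claim_equal_find_the_item : Prop := ∀ (arr : List Int) (k : Int), Dom_find_the_item arr k → Spec_find_the_item arr k (find_the_item arr k)

-- ===== LEMMAS AND PROOFS =====

-- the loop over the first n elements equals the filter-of-prefix formulation
theorem findA_loop_eq (arr : List Int) (k : Int) :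
    ∀ n, n ≤ arr.length →
    findA_loop arr k n =
      match ((arr.take n).filter (fun x => decide (-k < x) && decide (x < k))).getLast? with
      | none => none
      | some v => some [PySem.Int.toStr v, PySem.Int.toStr (((PySem.List.index? arr v).getD 0 : Nat) : Int)] := by
  intro n
  induction n with
  | zero => intro _; simp [findA_loop]
  | succ m ih =>
    intro h
    have hm : m < arr.length := h
    have htake : arr.take (m+1) = arr.take m ++ [arr[m]] := by
      rw [List.take_add_one]
      simp [List.getElem?_eq_getElem hm]
    have hget : arr.getD m 0 = arr[m] := List.getD_eq_getElem arr 0 hm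
    rw [findA_loop]
    simp only [hget, htake, List.filter_append]
    by_cases hp : -k < arr[m] ∧ arr[m] < k
    · have : (decide (-k < arr[m]) && decide (arr[m] < k)) = true := by
        simp [hp.1, hp.2]
      simp [hp, List.getLast?_append]
    · have : (decide (-k < arr[m]) && decide (arr[m] < k)) = false := by
        rcases not_and_or.mp hp with h1 | h1 <;> simp [h1]
      simp only [List.filter_cons, this, Bool.false_eq_true, if_false, List.filter_nil,
        List.append_nil, if_neg hp]
      exact ih (Nat.le_of_lt hm)

-- ===== VERDICT (by name: the statement is the Claim_ definition above) =====
theorem find_the_item_spec : Claim_equal_find_the_item := by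
  intro arr k _
  unfold Spec_find_the_item find_the_item find_the_item_alt
  rw [findA_loop_eq arr k arr.length (le_refl _)]
  simp only [List.take_length]
  set ms := arr.filter (fun x => decide (-k < x) && decide (x < k)) with hms
  by_cases h : ms = []
  · simp [h]
  · rw [dif_neg h, List.getLast?_eq_some_getLast h]
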